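-- pv_equiv track=rewrite | github.com/gabogara/week2_session1_2 | session2.py | unique_souvenir_counts
-- ===== SOURCE A (Python) =====
-- def unique_souvenir_counts(souvenirs):
--     frecuency = {}
--
--     for souvenir in souvenirs:
--         if souvenir in frecuency:
--             frecuency[souvenir] += 1
--         else:
--             frecuency[souvenir] = 1
--
--     return len(frecuency.values()) == len(set(frecuency.values()))
-- ===== SOURCE B (Python) =====
-- def unique_souvenir_counts(souvenirs):
--     counts = {}
--     for s in souvenirs:
--         counts[s] = counts.get(s, 0) + 1
--     vals = sorted(counts.values())
--     return all(x != y for x, y in zip(vals, vals[1:]))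
-- ===== Notes on version B (the rewrite author's own statement) =====
-- stated objective: idiomatic
-- what changed: B builds the frequency map with dict.get(s,0)+1 instead of A's membership branch, then tests distinctness of the counts by sorting them and scanning adjacent pairs for an equal neighbour, replacing A's len(values)==len(set(values)) hash-set test.
import Mathlib
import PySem

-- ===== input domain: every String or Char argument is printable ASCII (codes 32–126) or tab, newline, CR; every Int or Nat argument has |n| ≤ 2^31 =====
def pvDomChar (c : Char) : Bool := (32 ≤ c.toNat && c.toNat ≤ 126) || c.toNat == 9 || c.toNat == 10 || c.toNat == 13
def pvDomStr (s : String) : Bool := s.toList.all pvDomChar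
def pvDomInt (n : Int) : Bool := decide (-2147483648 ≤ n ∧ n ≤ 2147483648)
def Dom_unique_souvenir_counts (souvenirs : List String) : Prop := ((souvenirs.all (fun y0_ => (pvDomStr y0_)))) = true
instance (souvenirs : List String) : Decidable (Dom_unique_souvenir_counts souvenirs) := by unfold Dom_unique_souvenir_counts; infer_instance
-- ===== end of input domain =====

-- B replaces A's hash-set distinctness test on the counts by a sort-then-adjacent-scan; same return value, objective: idiomatic/alternative.

-- ===== PORT A =====
-- dict build: 'if souvenir in frecuency: frecuency[souvenir] += 1 else: frecuency[souvenir] = 1';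
-- result: 'len(frecuency.values()) == len(set(frecuency.values()))'
def unique_souvenir_counts (souvenirs : List String) : Bool :=
  let frecuency : PySem.Dict String Int :=
    souvenirs.foldl
      (fun d s => if d.contains s then d.insert s (d.getD s 0 + 1) else d.insert s 1)
      PySem.Dict.empty
  frecuency.values.length == (PySem.Set.ofList frecuency.values).length

-- ===== PORT B =====
-- dict build: 'counts[s] = counts.get(s, 0) + 1'; then 'vals = sorted(counts.values())'
-- and 'all(x != y for x, y in zip(vals, vals[1:]))'
def unique_souvenir_counts_alt (souvenirs : List String) : Bool :=
  let counts : PySem.Dict String Int :=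
    souvenirs.foldl (fun d s => d.insert s (d.getD s 0 + 1)) PySem.Dict.empty
  let vals := PySem.List.sorted counts.values (fun v => v) false
  (vals.zip (PySem.List.slice vals (some 1) none)).all (fun p => p.1 != p.2)

-- ===== PRECONDITION & SPEC =====
def Spec_unique_souvenir_counts (souvenirs : List String) (out : Bool) : Prop := out = unique_souvenir_counts_alt souvenirs
instance (souvenirs : List String) (out : Bool) : Decidable (Spec_unique_souvenir_counts souvenirs out) := by unfold Spec_unique_souvenir_counts; infer_instance

-- ===== CLAIM (what is proved, stated in full; the proofs are below) =====
def Claim_equal_unique_souvenir_counts : Prop := ∀ (souvenirs : List String), Dom_unique_souvenir_counts souvenirs → Spec_unique_souvenir_counts souvenirs (unique_souvenir_counts souvenirs)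

-- ===== LEMMAS AND PROOFS =====

-- A's dict-building step equals B's: when the key is absent, getD gives 0, so insert s 1 = insert s (0 + 1).
theorem pv_step_eq (d : PySem.Dict String Int) (s : String) :
    (if d.contains s then d.insert s (d.getD s 0 + 1) else d.insert s 1) = d.insert s (d.getD s 0 + 1) := by
  by_cases h : d.contains s = true
  · simp [h]
  · have h' : d.contains s = false := by simpa using h
    simp [h', PySem.Dict.getD_of_not_contains d 0 h']

-- Set.ofList is a sublist of its input (first occurrences in order).
theorem pv_foldl_add_sublist {α : Type} [BEq α] (xs : List α) :
    ∀ s : List α, List.Sublist (xs.foldl PySem.Set.add s) (s ++ xs) := by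
  induction xs with
  | nil => intro s; simp
  | cons x xs ih =>
    intro s
    have h1 : List.Sublist (List.foldl PySem.Set.add (PySem.Set.add s x) xs) (PySem.Set.add s x ++ xs) := ih _
    have h2 : List.Sublist (PySem.Set.add s x ++ xs) (s ++ x :: xs) := by
      unfold PySem.Set.add
      split
      · exact List.Sublist.append_left (List.sublist_cons_self x xs) s
      · simp
    exact h1.trans h2

theorem pv_ofList_sublist {α : Type} [BEq α] (xs : List α) :
    List.Sublist (PySem.Set.ofList xs) xs := by
  simpa using pv_foldl_add_sublist xs []

-- A's test 'len(vals) == len(set(vals))' decides distinctness of vals.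
theorem pv_len_set_eq_nodup (vs : List Int) :
    (vs.length == (PySem.Set.ofList vs).length) = decide vs.Nodup := by
  by_cases h : vs.Nodup
  · simp [h, PySem.Set.ofList_eq_self_of_nodup vs h]
  · have hne : vs.length ≠ (PySem.Set.ofList vs).length := by
      intro hlen
      exact h (((pv_ofList_sublist vs).eq_of_length hlen.symm) ▸ PySem.Set.nodup_ofList vs)
    simp [h, hne]

-- B's adjacent scan computes the no-equal-neighbours chain condition.
theorem pv_zip_all_eq_chain (vs : List Int) :
    ((vs.zip (vs.drop 1)).all (fun p => p.1 != p.2)) = decide (List.IsChain (· ≠ ·) vs) := by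
  induction vs with
  | nil => rfl
  | cons a t ih =>
    cases t with
    | nil => simp
    | cons b t' =>
      have hstep : (((a :: b :: t').zip ((a :: b :: t').drop 1)).all (fun p => p.1 != p.2))
          = ((a != b) && (((b :: t').zip ((b :: t').drop 1)).all (fun p => p.1 != p.2))) := rfl
      rw [hstep, ih]
      by_cases h : a = b <;> simp [h, List.isChain_cons_cons]

theorem pv_chain_lt_of_le_ne (vs : List Int) (hle : List.IsChain (· ≤ ·) vs)
    (hne : List.IsChain (· ≠ ·) vs) : List.IsChain (· < ·) vs := by
  induction vs with
  | nil => exact List.IsChain.nil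
  | cons a t ih =>
    cases t with
    | nil => exact List.isChain_singleton a
    | cons b t' =>
      rw [List.isChain_cons_cons] at hle hne ⊢
      exact ⟨lt_of_le_of_ne hle.1 hne.1, ih hle.2 hne.2⟩

-- on a ≤-sorted list, no equal neighbours ↔ all elements distinct
theorem pv_chain_ne_iff_nodup (vs : List Int) (hp : vs.Pairwise (· ≤ ·)) :
    List.IsChain (· ≠ ·) vs ↔ vs.Nodup := by
  constructor
  · intro hc
    have hlt : List.IsChain (· < ·) vs := pv_chain_lt_of_le_ne vs hp.isChain hc
    exact (List.isChain_iff_pairwise.mp hlt).imp ne_of_lt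
  · intro hnd
    exact hnd.isChain

-- ===== VERDICT (by name: the statement is the Claim_ definition above) =====
theorem unique_souvenir_counts_spec : Claim_equal_unique_souvenir_counts := by
  intro souvenirs _
  unfold Spec_unique_souvenir_counts unique_souvenir_counts unique_souvenir_counts_alt
  simp only [pv_step_eq]
  set vs : List Int := (souvenirs.foldl (fun d s => d.insert s (d.getD s 0 + 1)) PySem.Dict.empty).values with hvs
  set sv : List Int := PySem.List.sorted vs (fun v => v) false with hsv
  have hperm : sv.Perm vs := PySem.List.sorted_perm vs (fun v => v) false
  have hpair : sv.Pairwise (· ≤ ·) := PySem.List.sorted_pairwise vs (fun v => v)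
  rw [PySem.List.slice_from sv (by norm_num : (0:Int) ≤ 1)]
  simp only [Int.toNat_one]
  rw [pv_len_set_eq_nodup, pv_zip_all_eq_chain]
  rw [decide_eq_decide]
  rw [pv_chain_ne_iff_nodup sv hpair, hperm.nodup_iff]
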